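-- pv_equiv track=rewrite | github.com/mhschubert/Portfolio | compas/code/ml_utils/ml_utils.py | bracketing_age
-- ===== SOURCE A (Python) =====
-- def bracketing_age(pds_age):
--     ret = []
--     for i in list(pds_age):
--         if i <= 21:
--             ret.append(str(0))
--         elif i <= 30:
--             ret.append(str(1))
--         elif i <= 40:
--             ret.append(str(2))
--         elif i <= 50:
--             ret.append(str(3))
--         elif i <= 65:
--             ret.append(str(4))
--         elif i > 65:
--             ret.append(str(5))
--         else:
--             raise SystemExit('value error')
--
--     return ret
-- ===== SOURCE B (Python) =====
-- def bracketing_age(pds_age):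
--     # arithmetic bucketing: the 22..65 brackets are decades, so index = (i+9)//10 - 2,
--     # clamped to 4 for the wide 51..65 bracket; the ends (<=21, >65) are 0 and 5.
--     return [str(0 if i <= 21 else 5 if i > 65 else min(4, (i + 9) // 10 - 2))
--             for i in pds_age]
-- ===== Notes on version B (the rewrite author's own statement) =====
-- stated objective: alternative
-- what changed: Replaces the six-way comparison ladder with an arithmetic closed form: bracket index computed as min(4,(i+9)//10-2) using floor division (the middle brackets are decades), clamped to 0 for i<=21 and 5 for i>65, applied via a list comprehension instead of an accumulator loop.
import Mathlib
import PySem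

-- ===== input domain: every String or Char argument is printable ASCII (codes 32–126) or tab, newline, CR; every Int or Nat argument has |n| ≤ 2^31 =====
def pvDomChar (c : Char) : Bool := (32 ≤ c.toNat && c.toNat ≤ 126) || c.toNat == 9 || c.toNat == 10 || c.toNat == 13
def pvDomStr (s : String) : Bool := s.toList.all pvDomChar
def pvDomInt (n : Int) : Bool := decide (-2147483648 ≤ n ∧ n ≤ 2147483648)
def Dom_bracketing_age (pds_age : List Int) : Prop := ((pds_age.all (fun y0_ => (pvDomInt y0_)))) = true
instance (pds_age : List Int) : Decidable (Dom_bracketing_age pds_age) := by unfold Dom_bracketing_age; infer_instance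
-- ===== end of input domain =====

-- B replaces A's comparison ladder by an arithmetic closed form for the bracket index (objective: alternative).
-- A's final 'else: raise SystemExit' branch is unreachable on Int inputs, so both programs are total here.

-- ===== PORT A =====
def bracketing_age (pds_age : List Int) : List String :=
  pds_age.foldl (fun ret i =>
    if i ≤ 21 then ret ++ ["0"]
    else if i ≤ 30 then ret ++ ["1"]
    else if i ≤ 40 then ret ++ ["2"]
    else if i ≤ 50 then ret ++ ["3"]
    else if i ≤ 65 then ret ++ ["4"]
    else ret ++ ["5"]) []   -- 'elif i > 65' is true whenever reached on Int, so the raise branch is dead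

-- ===== PORT B =====
-- closed-form bracket index: decades for 22..65 via (i+9)//10 - 2, clamped at the ends
def bracketing_age_alt (pds_age : List Int) : List String :=
  pds_age.map (fun i =>
    PySem.Int.toStr
      (if i ≤ 21 then 0
       else if i > 65 then 5
       else min 4 (PySem.Int.floordiv (i + 9) 10 - 2)))

-- ===== PRECONDITION & SPEC =====
def Spec_bracketing_age (pds_age : List Int) (out : List String) : Prop := out = bracketing_age_alt pds_age
instance (pds_age : List Int) (out : List String) : Decidable (Spec_bracketing_age pds_age out) := by unfold Spec_bracketing_age; infer_instance

-- ===== CLAIM =====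
def Claim_equal_bracketing_age : Prop := ∀ (pds_age : List Int), Dom_bracketing_age pds_age → Spec_bracketing_age pds_age (bracketing_age pds_age)

-- ===== LEMMAS AND PROOFS =====
theorem bracket_elem_eq (i : Int) :
    (if i ≤ 21 then "0" else if i ≤ 30 then "1" else if i ≤ 40 then "2"
     else if i ≤ 50 then "3" else if i ≤ 65 then "4" else "5")
    = PySem.Int.toStr
        (if i ≤ 21 then 0
         else if i > 65 then 5
         else min 4 (PySem.Int.floordiv (i + 9) 10 - 2)) := by
  rw [PySem.Int.floordiv_eq_ediv_of_pos (by norm_num : (0:Int) < 10)]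
  split_ifs <;> first
    | decide
    | (exfalso; omega)
    | (rw [show min (4:Int) ((i + 9) / 10 - 2) = 1 from by omega]; decide)
    | (rw [show min (4:Int) ((i + 9) / 10 - 2) = 2 from by omega]; decide)
    | (rw [show min (4:Int) ((i + 9) / 10 - 2) = 3 from by omega]; decide)
    | (rw [show min (4:Int) ((i + 9) / 10 - 2) = 4 from by omega]; decide)

theorem bracket_foldl_map (pds_age : List Int) (acc : List String) :
    pds_age.foldl (fun ret i =>
      if i ≤ 21 then ret ++ ["0"]
      else if i ≤ 30 then ret ++ ["1"]
      else if i ≤ 40 then ret ++ ["2"]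
      else if i ≤ 50 then ret ++ ["3"]
      else if i ≤ 65 then ret ++ ["4"]
      else ret ++ ["5"]) acc
    = acc ++ bracketing_age_alt pds_age := by
  induction pds_age generalizing acc with
  | nil => simp [bracketing_age_alt]
  | cons i rest ih =>
    simp only [List.foldl, bracketing_age_alt, List.map_cons]
    have h := bracket_elem_eq i
    split_ifs at h ⊢ <;> rw [ih] <;> simp [bracketing_age_alt, h]

-- ===== VERDICT =====
theorem bracketing_age_spec : Claim_equal_bracketing_age := by
  intro pds_age _
  unfold Spec_bracketing_age bracketing_age
  simpa using bracket_foldl_map pds_age []
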